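-- pv_equiv track=rewrite | github.com/taketake-dev/PixcelQR | scripts/03_find_safe_area.py | get_safe_area_map
-- ===== SOURCE A (Python) =====
-- def get_safe_area_map(qr_matrix):
--     """
--     QRコードの設計図から、機能パターン（聖域）を特定し、
--     描画可能エリアの地図（マスク）を生成します。
--     - 0: データ領域 (描画可能)
--     - 1: ファインダーパターン
--     - 2: アライメントパターン
--     - 3: タイミングパターン
--     - 4: フォーマット情報など
--     """
--     size = len(qr_matrix)
--     mask = [[0] * size for _ in range(size)]
--
--     # ファインダーパターン (3つの角) とその周辺
--     finder_areas = [(0, 0), (0, size - 8), (size - 8, 0)]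
--     for y_start, x_start in finder_areas:
--         for r in range(8):
--             for c in range(8):
--                 if r == 7 or c == 7:
--                     mask[y_start + r][x_start + c] = 4 # 周辺の空白
--                 else:
--                     mask[y_start + r][x_start + c] = 1 # 本体
--
--     # タイミングパターン (6行目と6列目)
--     for i in range(8, size - 8):
--         mask[6][i] = 3 # 横
--         mask[i][6] = 3 # 縦
--
--     # アライメントパターン (バージョン2以上)
--     if size >= 25:
--         # qrcodeライブラリのバージョンごとのアライメント位置情報を参考にします
--         # Version 2 (25x25) の場合、(18, 18) が中心です
--         y_center, x_center = 18, 18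
--         for r in range(-2, 3):
--             for c in range(-2, 3):
--                 mask[y_center + r][x_center + c] = 2
--
--     return mask
-- ===== SOURCE B (Python) =====
-- def get_safe_area_map(qr_matrix):
--     """Per-cell classification: each cell's category is decided once by predicates
--     (finder blocks checked in reverse write order, then timing, then alignment)."""
--     size = len(qr_matrix)
--     if size < 8:
--         raise ValueError("qr_matrix too small: the three 8x8 finder corners do not fit")
--     f = size - 8
--
--     def category(y, x):
--         # finder blocks; last-written first: bottom-left, top-right, top-left
--         for ys, xs in ((f, 0), (0, f), (0, 0)):
--             r, c = y - ys, x - xs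
--             if 0 <= r < 8 and 0 <= c < 8:
--                 return 4 if r == 7 or c == 7 else 1
--         if (y == 6 and 8 <= x < f) or (x == 6 and 8 <= y < f):
--             return 3
--         if size >= 25 and 16 <= y <= 20 and 16 <= x <= 20:
--             return 2
--         return 0
--
--     return [[category(y, x) for x in range(size)] for y in range(size)]
-- ===== Notes on version B (the rewrite author's own statement) =====
-- stated objective: alternative
-- what changed: A allocates the grid and mutates it by filling whole regions in sequence (finder blocks, timing lines, alignment block), relying on overwrite order; B never mutates: it validates that the grid can hold the three 8x8 finder corners (where A just dies with IndexError) and builds the grid in one pass, classifying each cell (y,x) once by predicates (finder anchors checked in reverse write order, then timing, then alignment).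
import Mathlib
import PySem

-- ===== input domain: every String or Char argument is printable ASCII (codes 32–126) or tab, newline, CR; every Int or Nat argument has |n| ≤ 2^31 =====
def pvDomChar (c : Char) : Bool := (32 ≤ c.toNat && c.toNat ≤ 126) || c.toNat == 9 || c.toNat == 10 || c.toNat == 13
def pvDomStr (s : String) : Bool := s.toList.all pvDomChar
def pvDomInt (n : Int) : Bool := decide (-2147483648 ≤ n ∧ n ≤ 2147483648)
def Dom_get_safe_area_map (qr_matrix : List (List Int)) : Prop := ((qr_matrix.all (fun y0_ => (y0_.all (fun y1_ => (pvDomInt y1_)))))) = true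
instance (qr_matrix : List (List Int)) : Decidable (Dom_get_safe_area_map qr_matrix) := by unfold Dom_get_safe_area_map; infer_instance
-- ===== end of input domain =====

-- B replaces A's sequence of region fills (whose overwrites must be replayed in order) by a
-- single per-cell classification computing each cell's category once.  Objective: alternative.

-- ===== PORT A =====
-- mask[y][x] = v : read row y, set cell x, write the row back.
-- Exact for 0 ≤ y < len(mask), 0 ≤ x < len(row) — which holds for every write A performs under Pre_.
def maskSet (m : List (List Int)) (y x v : Int) : List (List Int) :=
  PySem.List.pySetD m y (PySem.List.pySetD (PySem.List.pyGetD m y []) x v)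

def get_safe_area_map (qr_matrix : List (List Int)) : List (List Int) :=
  let size : Int := (qr_matrix.length : Int)
  let mask : List (List Int) := List.replicate size.toNat (List.replicate size.toNat (0 : Int))
  let finder_areas : List (Int × Int) := [(0, 0), (0, size - 8), (size - 8, 0)]
  let mask := finder_areas.foldl (fun mask a =>
      (PySem.List.pyRange 0 8 1).foldl (fun mask r =>
        (PySem.List.pyRange 0 8 1).foldl (fun mask c =>
          if r = 7 ∨ c = 7 then maskSet mask (a.1 + r) (a.2 + c) 4
          else maskSet mask (a.1 + r) (a.2 + c) 1) mask) mask) mask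
  let mask := (PySem.List.pyRange 8 (size - 8) 1).foldl (fun mask i =>
      maskSet (maskSet mask 6 i 3) i 6 3) mask
  let mask := if size ≥ 25 then
      (PySem.List.pyRange (-2) 3 1).foldl (fun mask r =>
        (PySem.List.pyRange (-2) 3 1).foldl (fun mask c =>
          maskSet mask (18 + r) (18 + c) 2) mask) mask
    else mask
  mask

-- ===== PORT B =====
-- Source B raises ValueError for size < 8 (its validation guard); those inputs are exactly the ones
-- Pre_ excludes, so the port computes the per-cell classification unconditionally.
-- B's for-loop over the three finder anchors, returning the finder category early
def findCat (y x : Int) : List (Int × Int) → Option Int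
  | [] => none
  | a :: rest =>
      if 0 ≤ y - a.1 ∧ y - a.1 < 8 ∧ 0 ≤ x - a.2 ∧ x - a.2 < 8 then
        some (if y - a.1 = 7 ∨ x - a.2 = 7 then 4 else 1)
      else findCat y x rest

def categoryB (size y x : Int) : Int :=
  let f := size - 8
  match findCat y x [(f, 0), (0, f), (0, 0)] with
  | some v => v
  | none =>
      if (y = 6 ∧ 8 ≤ x ∧ x < f) ∨ (x = 6 ∧ 8 ≤ y ∧ y < f) then 3
      else if size ≥ 25 ∧ 16 ≤ y ∧ y ≤ 20 ∧ 16 ≤ x ∧ x ≤ 20 then 2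
      else 0

def get_safe_area_map_alt (qr_matrix : List (List Int)) : List (List Int) :=
  let size : Int := (qr_matrix.length : Int)
  (PySem.List.pyRange 0 size 1).map (fun y =>
    (PySem.List.pyRange 0 size 1).map (fun x => categoryB size y x))

-- ===== PRECONDITION & SPEC =====
-- A raises IndexError whenever len(qr_matrix) < 8 (the 8×8 finder loops run off the grid); Pre_ excludes exactly those.
def Pre_get_safe_area_map (qr_matrix : List (List Int)) : Prop := 8 ≤ (qr_matrix.length : Int)
instance (qr_matrix : List (List Int)) : Decidable (Pre_get_safe_area_map qr_matrix) := by unfold Pre_get_safe_area_map; infer_instance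
def pvWitness_get_safe_area_map : List (List Int) := List.replicate 8 (List.replicate 8 0)

def Spec_get_safe_area_map (qr_matrix : List (List Int)) (out : List (List Int)) : Prop := out = get_safe_area_map_alt qr_matrix
instance (qr_matrix : List (List Int)) (out : List (List Int)) : Decidable (Spec_get_safe_area_map qr_matrix out) := by unfold Spec_get_safe_area_map; infer_instance

-- ===== CLAIM (what is proved, stated in full; the proofs are below) =====
def Claim_equal_get_safe_area_map : Prop := ∀ (qr_matrix : List (List Int)), Dom_get_safe_area_map qr_matrix → Pre_get_safe_area_map qr_matrix → Spec_get_safe_area_map qr_matrix (get_safe_area_map qr_matrix)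

-- ===== LEMMAS AND PROOFS =====

-- The value written last at cell (y,x) by a list of (row, col, value) writes.
def lastHit : List (Int × Int × Int) → Int → Int → Option Int
  | [], _, _ => none
  | w :: ws, y, x => (lastHit ws y x).or (if w.1 = y ∧ w.2.1 = x then some w.2.2 else none)

-- Perform the writes in order.
def applyW (m : List (List Int)) : List (Int × Int × Int) → List (List Int)
  | [] => m
  | w :: ws => applyW (maskSet m w.1 w.2.1 w.2.2) ws

def peek (m : List (List Int)) (y x : Int) : Int := (m.getD y.toNat []).getD x.toNat 0

def Square (n : Nat) (m : List (List Int)) : Prop :=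
  m.length = n ∧ ∀ row ∈ m, row.length = n

def InRangeW (n : Nat) (w : Int × Int × Int) : Prop :=
  0 ≤ w.1 ∧ w.1 < n ∧ 0 ≤ w.2.1 ∧ w.2.1 < n

lemma lastHit_append (a b : List (Int × Int × Int)) (y x : Int) :
    lastHit (a ++ b) y x = (lastHit b y x).or (lastHit a y x) := by
  induction a with
  | nil => simp [lastHit]
  | cons w a ih => simp [lastHit, ih, Option.or_assoc]

lemma applyW_append (m : List (List Int)) (a b : List (Int × Int × Int)) :
    applyW m (a ++ b) = applyW (applyW m a) b := by
  induction a generalizing m with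
  | nil => simp [applyW]
  | cons w a ih => simp [applyW, ih]

lemma maskSet_eq (m : List (List Int)) (wy wx v : Int) (h1 : 0 ≤ wy) (h2 : 0 ≤ wx) :
    maskSet m wy wx v = m.set wy.toNat ((m.getD wy.toNat []).set wx.toNat v) := by
  unfold maskSet
  rw [PySem.List.pySetD_of_nonneg _ _ h2, PySem.List.pySetD_of_nonneg _ _ h1,
      PySem.List.pyGetD_of_nonneg _ _ h1]

lemma square_maskSet (n : Nat) (m : List (List Int)) (hm : Square n m)
    (wy wx v : Int) (hwy : 0 ≤ wy ∧ wy < n) (hwx : 0 ≤ wx ∧ wx < n) :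
    Square n (maskSet m wy wx v) := by
  have hl : m.length = n := hm.1
  rw [maskSet_eq m wy wx v hwy.1 hwx.1]
  refine ⟨by simp [hl], ?_⟩
  intro row hrow
  rcases List.mem_or_eq_of_mem_set hrow with h | h
  · exact hm.2 row h
  · subst h
    rw [List.length_set]
    have hlt : wy.toNat < m.length := by omega
    rw [List.getD_eq_getElem _ _ hlt]
    exact hm.2 _ (List.getElem_mem hlt)

lemma peek_maskSet (n : Nat) (m : List (List Int)) (hm : Square n m)
    (wy wx : Int) (hwy : 0 ≤ wy ∧ wy < n) (hwx : 0 ≤ wx ∧ wx < n)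
    (y x v : Int) (hy : 0 ≤ y ∧ y < n) (hx : 0 ≤ x ∧ x < n) :
    peek (maskSet m wy wx v) y x = if wy = y ∧ wx = x then v else peek m y x := by
  have hl : m.length = n := hm.1
  rw [maskSet_eq m wy wx v hwy.1 hwx.1]
  have hwyl : wy.toNat < m.length := by omega
  have hyl : y.toNat < m.length := by omega
  have hrl : (m.getD wy.toNat []).length = n := by
    rw [List.getD_eq_getElem _ _ hwyl]; exact hm.2 _ (List.getElem_mem hwyl)
  unfold peek
  by_cases hyy : wy = y
  · subst hyy
    have hrow : (m.set wy.toNat ((m.getD wy.toNat []).set wx.toNat v)).getD wy.toNat []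
        = (m.getD wy.toNat []).set wx.toNat v := by
      rw [List.getD_eq_getElem _ _ (by simpa using hwyl),
          List.getElem_set_self (by simpa using hwyl)]
    rw [hrow]
    by_cases hxx : wx = x
    · subst hxx
      rw [if_pos ⟨rfl, rfl⟩,
          List.getD_eq_getElem _ _ (by rw [List.length_set, hrl]; omega),
          List.getElem_set_self (by rw [List.length_set, hrl]; omega)]
    · have htx : wx.toNat ≠ x.toNat := by omega
      rw [if_neg (fun hc => hxx hc.2),
          List.getD_eq_getElem _ _ (by rw [List.length_set, hrl]; omega),
          List.getElem_set_ne htx (by rw [List.length_set, hrl]; omega)]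
      exact (List.getD_eq_getElem _ _ (by omega : x.toNat < (m.getD wy.toNat []).length)).symm
  · have hts : wy.toNat ≠ y.toNat := by omega
    rw [if_neg (fun hc => hyy hc.1)]
    have hrow : (m.set wy.toNat ((m.getD wy.toNat []).set wx.toNat v)).getD y.toNat []
        = m.getD y.toNat [] := by
      rw [List.getD_eq_getElem _ _ (by simpa using hyl),
          List.getElem_set_ne hts (by simpa using hyl), List.getD_eq_getElem _ _ hyl]
    rw [hrow]

lemma applyW_spec (n : Nat) (ws : List (Int × Int × Int)) (m : List (List Int))
    (hm : Square n m) (hws : ∀ w ∈ ws, InRangeW n w) :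
    Square n (applyW m ws) ∧ ∀ y x : Int, 0 ≤ y → y < n → 0 ≤ x → x < n →
      peek (applyW m ws) y x = (lastHit ws y x).getD (peek m y x) := by
  induction ws generalizing m with
  | nil => exact ⟨hm, fun y x _ _ _ _ => by simp [applyW, lastHit]⟩
  | cons w ws ih =>
    have hw : InRangeW n w := hws w (by simp)
    have hm' := square_maskSet n m hm w.1 w.2.1 w.2.2 ⟨hw.1, hw.2.1⟩ ⟨hw.2.2.1, hw.2.2.2⟩
    obtain ⟨hsq, hpk⟩ := ih (maskSet m w.1 w.2.1 w.2.2) hm' (fun u hu => hws u (by simp [hu]))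
    refine ⟨hsq, fun y x hy1 hy2 hx1 hx2 => ?_⟩
    rw [show applyW m (w :: ws) = applyW (maskSet m w.1 w.2.1 w.2.2) ws from rfl,
        hpk y x hy1 hy2 hx1 hx2,
        peek_maskSet n m hm w.1 w.2.1 ⟨hw.1, hw.2.1⟩ ⟨hw.2.2.1, hw.2.2.2⟩ y x w.2.2 ⟨hy1, hy2⟩ ⟨hx1, hx2⟩]
    simp only [lastHit]
    cases lastHit ws y x with
    | some v => simp
    | none => simp only [Option.none_or]; split <;> simp

-- write lists of A's loops
def rowW (Y xs : Int) (w : Nat) (v : Int → Int) : List (Int × Int × Int) :=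
  (PySem.List.pyRange 0 w 1).flatMap (fun c => [(Y, xs + c, v c)])

def rectW (ys xs : Int) (h w : Nat) (v : Int → Int → Int) : List (Int × Int × Int) :=
  (PySem.List.pyRange 0 h 1).flatMap (fun r => rowW (ys + r) xs w (v r))

def fv (r c : Int) : Int := if r = 7 ∨ c = 7 then 4 else 1

def timW (s : Int) : List (Int × Int × Int) :=
  (PySem.List.pyRange 8 (s - 8) 1).flatMap (fun i => [(6, i, 3), (i, 6, 3)])

def wListA (s : Int) : List (Int × Int × Int) :=
  (rectW 0 0 8 8 fv ++ rectW 0 (s - 8) 8 8 fv ++ rectW (s - 8) 0 8 8 fv) ++ timW s ++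
    (if s ≥ 25 then rectW 16 16 5 5 (fun _ _ => 2) else [])

lemma foldl_applyW {α : Type} (L : List α) (g : α → List (Int × Int × Int))
    (f : List (List Int) → α → List (List Int)) (hf : ∀ m i, f m i = applyW m (g i)) :
    ∀ m, L.foldl f m = applyW m (L.flatMap g) := by
  induction L with
  | nil => intro m; simp [applyW]
  | cons a L ih => intro m; rw [List.foldl_cons, hf, List.flatMap_cons, applyW_append, ih]

lemma inner_c (ys xs r : Int) (m : List (List Int)) :
    (PySem.List.pyRange 0 8 1).foldl (fun mask c =>
      if r = 7 ∨ c = 7 then maskSet mask (ys + r) (xs + c) 4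
      else maskSet mask (ys + r) (xs + c) 1) m
    = applyW m (rowW (ys + r) xs 8 (fv r)) := by
  rw [rowW, show (((8 : Nat)) : Int) = (8 : Int) from rfl]
  exact foldl_applyW _ (fun c => [(ys + r, xs + c, fv r c)]) _
    (fun m c => by by_cases h : r = 7 ∨ c = 7 <;> simp [applyW, fv, h]) m

lemma inner_r (ys xs : Int) (m : List (List Int)) :
    (PySem.List.pyRange 0 8 1).foldl (fun mask r => applyW mask (rowW (ys + r) xs 8 (fv r))) m
    = applyW m (rectW ys xs 8 8 fv) := by
  rw [rectW, show (((8 : Nat)) : Int) = (8 : Int) from rfl]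
  exact foldl_applyW _ (fun r => rowW (ys + r) xs 8 (fv r)) _ (fun _ _ => rfl) m

lemma tim_fold (s : Int) (m : List (List Int)) :
    (PySem.List.pyRange 8 (s - 8) 1).foldl (fun mask i => maskSet (maskSet mask 6 i 3) i 6 3) m
    = applyW m (timW s) := by
  rw [timW]
  exact foldl_applyW _ (fun i => [(6, i, 3), (i, 6, 3)]) _ (fun _ _ => rfl) m

lemma align_eq_rect :
    ((PySem.List.pyRange (-2) 3 1).flatMap (fun r =>
      (PySem.List.pyRange (-2) 3 1).flatMap (fun c => [((18 : Int) + r, (18 : Int) + c, (2 : Int))])))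
    = rectW 16 16 5 5 (fun _ _ => 2) := by decide

lemma align_c (r : Int) (m : List (List Int)) :
    (PySem.List.pyRange (-2) 3 1).foldl (fun mask c => maskSet mask (18 + r) (18 + c) 2) m
    = applyW m ((PySem.List.pyRange (-2) 3 1).flatMap (fun c => [((18 : Int) + r, (18 : Int) + c, (2 : Int))])) :=
  foldl_applyW _ (fun c => [((18 : Int) + r, (18 : Int) + c, (2 : Int))])
    (fun mask c => maskSet mask (18 + r) (18 + c) 2) (fun _ _ => rfl) m

lemma align_r (m : List (List Int)) :
    (PySem.List.pyRange (-2) 3 1).foldl (fun mask r =>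
      applyW mask ((PySem.List.pyRange (-2) 3 1).flatMap (fun c => [((18 : Int) + r, (18 : Int) + c, (2 : Int))]))) m
    = applyW m (rectW 16 16 5 5 (fun _ _ => 2)) := by
  rw [← align_eq_rect]
  exact foldl_applyW _ _ _ (fun _ _ => rfl) m

lemma A_eq_applyW (qr : List (List Int)) :
    get_safe_area_map qr =
      applyW (List.replicate (qr.length : Int).toNat (List.replicate (qr.length : Int).toNat (0 : Int)))
        (wListA (qr.length : Int)) := by
  simp only [get_safe_area_map]
  simp only [inner_c, inner_r, List.foldl_cons, List.foldl_nil, tim_fold, align_c, align_r]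
  rw [wListA]
  simp only [applyW_append]
  by_cases h : (qr.length : Int) ≥ 25 <;> simp [h, applyW]

lemma lastHit_row (Y xs : Int) (w : Nat) (v : Int → Int) (y x : Int) :
    lastHit (rowW Y xs w v) y x =
      if Y = y ∧ 0 ≤ x - xs ∧ x - xs < (w : Int) then some (v (x - xs)) else none := by
  induction w with
  | zero =>
    rw [rowW, Nat.cast_zero, PySem.List.pyRange_one_eq_nil le_rfl]
    simp only [List.flatMap_nil, lastHit]
    rw [if_neg (by omega)]
  | succ w ih =>
    have hsplit : PySem.List.pyRange 0 ((w : Int) + 1) 1 = PySem.List.pyRange 0 (w : Int) 1 ++ [(w : Int)] :=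
      PySem.List.pyRange_one_succ_right (by omega)
    rw [rowW, show (((w + 1 : Nat)) : Int) = (w : Int) + 1 by push_cast; ring, hsplit, List.flatMap_append, lastHit_append]
    simp only [List.flatMap_cons, List.flatMap_nil, List.append_nil]
    rw [← rowW, ih]
    rw [show lastHit [(Y, xs + (w : Int), v (w : Int))] y x
        = (if Y = y ∧ xs + (w : Int) = x then some (v (w : Int)) else none) by
      simp [lastHit]]
    by_cases h1 : Y = y ∧ xs + (w : Int) = x
    · rw [if_pos h1, Option.some_or, if_pos (show Y = y ∧ 0 ≤ x - xs ∧ x - xs < (w : Int) + 1 by omega)]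
      have hxw : x - xs = (w : Int) := by omega
      rw [hxw]
    · rw [if_neg h1, Option.none_or]
      by_cases h2 : Y = y ∧ 0 ≤ x - xs ∧ x - xs < (w : Int)
      · rw [if_pos h2, if_pos (show Y = y ∧ 0 ≤ x - xs ∧ x - xs < (w : Int) + 1 by omega)]
      · rw [if_neg h2, if_neg (show ¬(Y = y ∧ 0 ≤ x - xs ∧ x - xs < (w : Int) + 1) by omega)]

lemma lastHit_rect (ys xs : Int) (hh w : Nat) (v : Int → Int → Int) (y x : Int) :
    lastHit (rectW ys xs hh w v) y x =
      if 0 ≤ y - ys ∧ y - ys < (hh : Int) ∧ 0 ≤ x - xs ∧ x - xs < (w : Int) then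
        some (v (y - ys) (x - xs)) else none := by
  induction hh with
  | zero =>
    rw [rectW, Nat.cast_zero, PySem.List.pyRange_one_eq_nil le_rfl]
    simp only [List.flatMap_nil, lastHit]
    rw [if_neg (by omega)]
  | succ hh ih =>
    have hsplit : PySem.List.pyRange 0 ((hh : Int) + 1) 1 = PySem.List.pyRange 0 (hh : Int) 1 ++ [(hh : Int)] :=
      PySem.List.pyRange_one_succ_right (by omega)
    rw [rectW, show (((hh + 1 : Nat)) : Int) = (hh : Int) + 1 by push_cast; ring, hsplit, List.flatMap_append, lastHit_append]
    simp only [List.flatMap_cons, List.flatMap_nil, List.append_nil]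
    rw [← rectW, ih, lastHit_row]
    by_cases h1 : ys + (hh : Int) = y ∧ 0 ≤ x - xs ∧ x - xs < (w : Int)
    · rw [if_pos h1, Option.some_or,
          if_pos (show 0 ≤ y - ys ∧ y - ys < (hh : Int) + 1 ∧ 0 ≤ x - xs ∧ x - xs < (w : Int) by omega)]
      have hyh : y - ys = (hh : Int) := by omega
      rw [hyh]
    · rw [if_neg h1, Option.none_or]
      by_cases h2 : 0 ≤ y - ys ∧ y - ys < (hh : Int) ∧ 0 ≤ x - xs ∧ x - xs < (w : Int)
      · rw [if_pos h2,
            if_pos (show 0 ≤ y - ys ∧ y - ys < (hh : Int) + 1 ∧ 0 ≤ x - xs ∧ x - xs < (w : Int) by omega)]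
      · rw [if_neg h2,
            if_neg (show ¬(0 ≤ y - ys ∧ y - ys < (hh : Int) + 1 ∧ 0 ≤ x - xs ∧ x - xs < (w : Int)) by omega)]

lemma lastHit_tim' (k : Nat) (y x : Int) :
    lastHit ((PySem.List.pyRange 8 (8 + (k : Int)) 1).flatMap (fun i => [((6 : Int), i, (3 : Int)), (i, 6, 3)])) y x =
      if (y = 6 ∧ 8 ≤ x ∧ x < 8 + (k : Int)) ∨ (x = 6 ∧ 8 ≤ y ∧ y < 8 + (k : Int)) then some 3 else none := by
  induction k with
  | zero =>
    rw [Nat.cast_zero, show (8 : Int) + 0 = 8 from rfl, PySem.List.pyRange_one_eq_nil le_rfl]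
    simp only [List.flatMap_nil, lastHit]
    rw [if_neg (by omega)]
  | succ k ih =>
    have hsplit : PySem.List.pyRange 8 (8 + (k : Int) + 1) 1
        = PySem.List.pyRange 8 (8 + (k : Int)) 1 ++ [8 + (k : Int)] :=
      PySem.List.pyRange_one_succ_right (by omega)
    rw [show ((8 : Int) + ((k + 1 : Nat) : Int)) = 8 + (k : Int) + 1 by push_cast; ring,
        hsplit, List.flatMap_append, lastHit_append, ih]
    simp only [List.flatMap_cons, List.flatMap_nil, List.append_nil, lastHit, Option.none_or]
    by_cases t2 : 8 + (k : Int) = y ∧ (6 : Int) = x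
    · rw [if_pos t2, Option.some_or, Option.some_or, if_pos (by omega)]
    · rw [if_neg t2, Option.none_or]
      by_cases t1 : (6 : Int) = y ∧ 8 + (k : Int) = x
      · rw [if_pos t1, Option.some_or, if_pos (by omega)]
      · rw [if_neg t1, Option.none_or]
        by_cases t0 : (y = 6 ∧ 8 ≤ x ∧ x < 8 + (k : Int)) ∨ (x = 6 ∧ 8 ≤ y ∧ y < 8 + (k : Int))
        · rw [if_pos t0, if_pos (by omega)]
        · rw [if_neg t0, if_neg (by omega)]

lemma lastHit_tim (s : Int) (hs : 8 ≤ s) (y x : Int) :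
    lastHit (timW s) y x =
      if (y = 6 ∧ 8 ≤ x ∧ x < s - 8) ∨ (x = 6 ∧ 8 ≤ y ∧ y < s - 8) then some 3 else none := by
  by_cases h : 16 ≤ s
  · have heq : s - 8 = 8 + (((s - 16).toNat : Nat) : Int) := by omega
    rw [timW, heq, lastHit_tim' (s - 16).toNat y x]
  · rw [timW, PySem.List.pyRange_one_eq_nil (by omega)]
    simp only [List.flatMap_nil, lastHit]
    rw [if_neg (by omega)]

lemma orGetD (p : Prop) [Decidable p] (v : Int) (o : Option Int) (d : Int) :
    ((if p then some v else none).or o).getD d = if p then v else o.getD d := by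
  split <;> simp

lemma iteGetD (p : Prop) [Decidable p] (v : Int) (d : Int) :
    (if p then some v else none : Option Int).getD d = if p then v else d := by
  split <;> simp

lemma categoryB_eq (s y x : Int) :
    categoryB s y x =
      if 0 ≤ y - (s - 8) ∧ y - (s - 8) < 8 ∧ 0 ≤ x - 0 ∧ x - 0 < 8 then
        (if y - (s - 8) = 7 ∨ x - 0 = 7 then 4 else 1)
      else if 0 ≤ y - 0 ∧ y - 0 < 8 ∧ 0 ≤ x - (s - 8) ∧ x - (s - 8) < 8 then
        (if y - 0 = 7 ∨ x - (s - 8) = 7 then 4 else 1)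
      else if 0 ≤ y - 0 ∧ y - 0 < 8 ∧ 0 ≤ x - 0 ∧ x - 0 < 8 then
        (if y - 0 = 7 ∨ x - 0 = 7 then 4 else 1)
      else if (y = 6 ∧ 8 ≤ x ∧ x < s - 8) ∨ (x = 6 ∧ 8 ≤ y ∧ y < s - 8) then 3
      else if s ≥ 25 ∧ 16 ≤ y ∧ y ≤ 20 ∧ 16 ≤ x ∧ x ≤ 20 then 2
      else 0 := by
  simp only [categoryB, findCat]
  split_ifs <;> rfl

lemma wListA_inRange (s : Int) (hs : 8 ≤ s) : ∀ w ∈ wListA s, InRangeW s.toNat w := by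
  intro w hw
  have hrect : ∀ (ys xs : Int) (hh ww : Nat) (v : Int → Int → Int), w ∈ rectW ys xs hh ww v →
      ys ≤ w.1 ∧ w.1 < ys + hh ∧ xs ≤ w.2.1 ∧ w.2.1 < xs + ww := by
    intro ys xs hh ww v h
    simp only [rectW, rowW, List.mem_flatMap, PySem.List.mem_pyRange_one, List.mem_singleton] at h
    obtain ⟨r, hr, c, hc, hw'⟩ := h
    subst hw'
    simp only
    omega
  unfold InRangeW
  rw [wListA] at hw
  rcases List.mem_append.mp hw with hw1 | h
  · rcases List.mem_append.mp hw1 with hw2 | h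
    · rcases List.mem_append.mp hw2 with hw3 | h
      · rcases List.mem_append.mp hw3 with h | h
        · have := hrect _ _ _ _ _ h; omega
        · have := hrect _ _ _ _ _ h; omega
      · have := hrect _ _ _ _ _ h; omega
    · rw [timW] at h
      rcases List.mem_flatMap.mp h with ⟨i, hi, hw'⟩
      rw [PySem.List.mem_pyRange_one] at hi
      simp only [List.mem_cons, List.not_mem_nil, or_false] at hw'
      rcases hw' with h' | h' <;> subst h' <;> simp only <;> omega
  · by_cases h25 : s ≥ 25
    · rw [if_pos h25] at h
      have := hrect _ _ _ _ _ h; omega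
    · rw [if_neg h25] at h
      simp at h

lemma peek_mask0 (n : Nat) (y x : Int) (hy : 0 ≤ y ∧ y < n) (hx : 0 ≤ x ∧ x < n) :
    peek (List.replicate n (List.replicate n (0 : Int))) y x = 0 := by
  have h1 : y.toNat < n := by omega
  have h2 : x.toNat < n := by omega
  unfold peek
  simp [List.getD_eq_getElem?_getD, h1, h2]

lemma lastHit_wListA (s : Int) (hs : 8 ≤ s) (y x : Int) :
    (lastHit (wListA s) y x).getD 0 = categoryB s y x := by
  rw [wListA]
  simp only [lastHit_append]
  rw [lastHit_rect, lastHit_rect, lastHit_rect, lastHit_tim s hs]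
  have halign : lastHit (if s ≥ 25 then rectW 16 16 5 5 (fun _ _ => 2) else []) y x
      = if s ≥ 25 ∧ 16 ≤ y ∧ y ≤ 20 ∧ 16 ≤ x ∧ x ≤ 20 then some 2 else none := by
    by_cases h25 : s ≥ 25
    · rw [if_pos h25, lastHit_rect]
      by_cases hb : 0 ≤ y - 16 ∧ y - 16 < ((5 : Nat) : Int) ∧ 0 ≤ x - 16 ∧ x - 16 < ((5 : Nat) : Int)
      · rw [if_pos hb, if_pos (by omega)]
      · rw [if_neg hb, if_neg (by omega)]
    · rw [if_neg h25, show lastHit [] y x = none from rfl, if_neg (by omega)]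
  rw [halign, categoryB_eq]
  simp only [orGetD, iteGetD, Nat.cast_ofNat, fv]
  split_ifs <;> first | rfl | omega

-- ===== VERDICT (by name: the statement is the Claim_ definition above) =====
theorem get_safe_area_map_spec : Claim_equal_get_safe_area_map := by
  intro qr _ hpre
  unfold Spec_get_safe_area_map
  have hs : (8 : Int) ≤ (qr.length : Int) := hpre
  have htoNat : ((qr.length : Int)).toNat = qr.length := Int.toNat_natCast _
  rw [A_eq_applyW, htoNat]
  obtain ⟨hsqA, hpeek⟩ := applyW_spec qr.length (wListA (qr.length : Int))
    (List.replicate qr.length (List.replicate qr.length (0 : Int)))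
    ⟨by simp, fun r hr => by rw [List.eq_of_mem_replicate hr]; simp⟩
    (fun w hw => by have := wListA_inRange (qr.length : Int) hs w hw; rwa [htoNat] at this)
  simp only [get_safe_area_map_alt]
  refine List.ext_getElem ?_ ?_
  · rw [hsqA.1, List.length_map, PySem.List.length_pyRange_one]; omega
  · intro i hi1 hi2
    have hiN : i < qr.length := by rwa [hsqA.1] at hi1
    have hii : (i : Int) < (qr.length : Int) := by exact_mod_cast hiN
    rw [List.getElem_map]
    refine List.ext_getElem ?_ ?_
    · rw [hsqA.2 _ (List.getElem_mem hi1), List.length_map, PySem.List.length_pyRange_one]; omega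
    · intro j hj1 hj2
      have hjN : j < qr.length := by
        have := hsqA.2 _ (List.getElem_mem hi1); omega
      have hji : (j : Int) < (qr.length : Int) := by exact_mod_cast hjN
      rw [List.getElem_map]
      simp only [PySem.List.getElem_pyRange_one, zero_add]
      have hcell :
          ((applyW (List.replicate qr.length (List.replicate qr.length (0 : Int)))
              (wListA (qr.length : Int)))[i]'hi1)[j]'hj1
            = peek (applyW (List.replicate qr.length (List.replicate qr.length (0 : Int)))
              (wListA (qr.length : Int))) (i : Int) (j : Int) := by
        unfold peek
        rw [Int.toNat_natCast, Int.toNat_natCast,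
            List.getD_eq_getElem _ _ hi1, List.getD_eq_getElem _ _ hj1]
      rw [hcell, hpeek (i : Int) (j : Int) (by omega) hii (by omega) hji,
          peek_mask0 qr.length (i : Int) (j : Int) ⟨by omega, hii⟩ ⟨by omega, hji⟩,
          lastHit_wListA (qr.length : Int) hs (i : Int) (j : Int)]
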